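-- pv_equiv track=rewrite | github.com/python/cpython | Tools/jit/example_trace_dump.py | short_branchy_loop
-- ===== SOURCE A (Python) =====
-- def short_branchy_loop(n):
--     # Branches are correlated and exit 1 time in 4.
--     t = 0
--     for i in range(n):
--         # Start with a few operations to form a viable trace
--         t += 1
--         t += 1
--         t += 1
--         if not t & 6:
--             continue
--         t += 1
--         if not t & 12:
--             continue
--         t += 1
--         if not t & 24:
--             continue
--         t += 1
--         if not t & 48:
--             continue
--         t += 1
--     return t
-- ===== SOURCE B (Python) =====
-- def _step(t):
--     t += 3
--     if not t & 6:
--         return t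
--     t += 1
--     if not t & 12:
--         return t
--     t += 1
--     if not t & 24:
--         return t
--     t += 1
--     if not t & 48:
--         return t
--     return t + 1
--
--
-- def short_branchy_loop(n):
--     # The loop state is determined by t mod 64, so the trajectory is eventually
--     # periodic; after 64 iterations we are on the cycle.  Find the period
--     # (at most 64 by pigeonhole; the bound on L is a safe guard) and jump over
--     # all full cycles arithmetically.
--     t = 0
--     i = 0
--     while i < n and i < 64:
--         t = _step(t)
--         i += 1
--     if i < n:
--         u = _step(t)
--         L = 1
--         while L < 64 and u % 64 != t % 64:
--             u = _step(u)
--             L += 1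
--         cycles = (n - i) // L
--         rem = (n - i) % L
--         t += cycles * (u - t)
--         for _ in range(rem):
--             t = _step(t)
--     return t
-- ===== Notes on version B (the rewrite author's own statement) =====
-- stated objective: faster
-- what changed: B exploits that the loop state is t mod 64: it runs at most 64 warm-up iterations to land on the cycle, finds the period and per-cycle gain, and replaces all remaining full cycles by one multiplication, instead of A's iteration-by-iteration loop.
import Mathlib
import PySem

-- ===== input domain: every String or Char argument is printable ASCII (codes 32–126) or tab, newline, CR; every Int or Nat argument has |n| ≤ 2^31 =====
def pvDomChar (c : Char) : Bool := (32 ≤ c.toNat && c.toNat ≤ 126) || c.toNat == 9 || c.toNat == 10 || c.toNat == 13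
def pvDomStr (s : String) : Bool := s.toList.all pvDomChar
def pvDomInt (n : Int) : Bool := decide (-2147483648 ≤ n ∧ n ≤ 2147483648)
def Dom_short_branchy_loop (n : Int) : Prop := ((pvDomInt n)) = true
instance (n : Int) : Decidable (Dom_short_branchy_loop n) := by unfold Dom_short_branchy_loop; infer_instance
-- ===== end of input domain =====

-- B replaces A's O(n) loop by cycle detection on the loop state t mod 64:
-- it runs at most 64+64+12 iterations and jumps over all full cycles arithmetically.

-- ===== PORT A =====
-- literal transliteration of A: fold the loop body over range(n)
def short_branchy_loop (n : Int) : Int :=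
  (PySem.List.pyRange 0 n 1).foldl
    (fun t _ =>
      let t := t + 1
      let t := t + 1
      let t := t + 1
      if PySem.Int.band t 6 = 0 then t else
      let t := t + 1
      if PySem.Int.band t 12 = 0 then t else
      let t := t + 1
      if PySem.Int.band t 24 = 0 then t else
      let t := t + 1
      if PySem.Int.band t 48 = 0 then t else
      t + 1) 0

-- ===== PORT B =====
-- Source B's helper _step
def sblStep (t : Int) : Int :=
  let t := t + 3
  if PySem.Int.band t 6 = 0 then t else
  let t := t + 1
  if PySem.Int.band t 12 = 0 then t else
  let t := t + 1
  if PySem.Int.band t 24 = 0 then t else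
  let t := t + 1
  if PySem.Int.band t 48 = 0 then t else
  t + 1

-- Source B's first while loop ('while i < n and i < 64'); the Nat fuel (64 suffices,
-- since the guard i < 64 stops the loop) only makes the recursion total.
def sblWarm (n : Int) : Nat → Int → Int → Int × Int
  | 0, t, i => (t, i)
  | fuel+1, t, i =>
      if i < n ∧ i < 64 then sblWarm n fuel (sblStep t) (i+1) else (t, i)

-- Source B's second while loop ('while L < 64 and u % 64 != t % 64'); fuel as above.
def sblFind (t : Int) : Nat → Int → Int → Int × Int
  | 0, u, L => (u, L)
  | fuel+1, u, L =>
      if L < 64 ∧ PySem.Int.mod u 64 ≠ PySem.Int.mod t 64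
      then sblFind t fuel (sblStep u) (L+1) else (u, L)

def short_branchy_loop_alt (n : Int) : Int :=
  let p := sblWarm n 64 0 0
  let t := p.1
  let i := p.2
  if i < n then
    let q := sblFind t 64 (sblStep t) 1
    let u := q.1
    let L := q.2
    let cycles := PySem.Int.floordiv (n - i) L
    let rem := PySem.Int.mod (n - i) L
    let t := t + cycles * (u - t)
    (PySem.List.pyRange 0 rem 1).foldl (fun t _ => sblStep t) t
  else t

-- ===== PRECONDITION & SPEC =====
def Spec_short_branchy_loop (n : Int) (out : Int) : Prop := out = short_branchy_loop_alt n
instance (n : Int) (out : Int) : Decidable (Spec_short_branchy_loop n out) := by unfold Spec_short_branchy_loop; infer_instance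

-- ===== CLAIM (what is proved, stated in full; the proofs are below) =====
def Claim_equal_short_branchy_loop : Prop := ∀ (n : Int), Dom_short_branchy_loop n → Spec_short_branchy_loop n (short_branchy_loop n)

-- ===== LEMMAS AND PROOFS =====

-- A's loop body is exactly one sblStep
lemma bodyA_eq (t x : Int) :
    (fun (t : Int) (_ : Int) =>
      let t := t + 1
      let t := t + 1
      let t := t + 1
      if PySem.Int.band t 6 = 0 then t else
      let t := t + 1
      if PySem.Int.band t 12 = 0 then t else
      let t := t + 1
      if PySem.Int.band t 24 = 0 then t else
      let t := t + 1
      if PySem.Int.band t 48 = 0 then t else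
      t + 1) t x = sblStep t := by
  simp only [sblStep]
  have e : t + 1 + 1 + 1 = t + 3 := by ring
  rw [e]

-- folding a one-argument step over any list iterates it length-many times
lemma foldl_const_iter (f : Int → Int) (l : List Int) :
    ∀ t : Int, l.foldl (fun s _ => f s) t = f^[l.length] t := by
  induction l with
  | nil => intro t; rfl
  | cons x xs ih =>
      intro t
      simp only [List.foldl_cons, List.length_cons, ih, Function.iterate_succ_apply]

lemma A_iter (n : Int) : short_branchy_loop n = sblStep^[n.toNat] 0 := by
  unfold short_branchy_loop
  have hb : (fun (t : Int) (_ : Int) =>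
      let t := t + 1
      let t := t + 1
      let t := t + 1
      if PySem.Int.band t 6 = 0 then t else
      let t := t + 1
      if PySem.Int.band t 12 = 0 then t else
      let t := t + 1
      if PySem.Int.band t 24 = 0 then t else
      let t := t + 1
      if PySem.Int.band t 48 = 0 then t else
      t + 1) = (fun t _ => sblStep t) := by
    funext t x; exact bodyA_eq t x
  rw [hb, foldl_const_iter, PySem.List.length_pyRange_one]
  norm_num

-- masks below 64 only see the low six bits
lemma nat_land_lt64 (m msk : Nat) (h : msk < 64) : m &&& msk = (m % 64) &&& msk := by
  apply Nat.eq_of_testBit_eq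
  intro i
  rcases lt_or_ge i 6 with hi | hi
  · rw [Nat.testBit_and, Nat.testBit_and, show (64:Nat) = 2^6 from by norm_num,
      Nat.testBit_mod_two_pow]
    simp [hi]
  · have hmsk : msk.testBit i = false := by
      apply Nat.testBit_lt_two_pow
      calc msk < 64 := h
        _ ≤ 2 ^ i := by
          calc (64:Nat) = 2 ^ 6 := rfl
            _ ≤ 2 ^ i := Nat.pow_le_pow_right (by norm_num) hi
    simp [Nat.testBit_and, hmsk]

lemma band_mod64 (a b msk : Int) (ha : 0 ≤ a) (hb : 0 ≤ b) (hm : 0 ≤ msk)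
    (hlt : msk < 64) (h : a % 64 = b % 64) :
    PySem.Int.band a msk = PySem.Int.band b msk := by
  rw [PySem.Int.band_of_nonneg ha hm, PySem.Int.band_of_nonneg hb hm]
  have h1 : a.toNat % 64 = b.toNat % 64 := by omega
  rw [nat_land_lt64 a.toNat msk.toNat (by omega), nat_land_lt64 b.toNat msk.toNat (by omega), h1]

lemma g_shift (t k : Int) (ht : 0 ≤ t) (hk : 0 ≤ k) :
    sblStep (t + 64 * k) = sblStep t + 64 * k := by
  simp only [sblStep]
  have h6 : PySem.Int.band (t + 64 * k + 3) 6 = PySem.Int.band (t + 3) 6 :=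
    band_mod64 _ _ _ (by omega) (by omega) (by norm_num) (by norm_num) (by omega)
  have h12 : PySem.Int.band (t + 64 * k + 3 + 1) 12 = PySem.Int.band (t + 3 + 1) 12 :=
    band_mod64 _ _ _ (by omega) (by omega) (by norm_num) (by norm_num) (by omega)
  have h24 : PySem.Int.band (t + 64 * k + 3 + 1 + 1) 24 = PySem.Int.band (t + 3 + 1 + 1) 24 :=
    band_mod64 _ _ _ (by omega) (by omega) (by norm_num) (by norm_num) (by omega)
  have h48 : PySem.Int.band (t + 64 * k + 3 + 1 + 1 + 1) 48 = PySem.Int.band (t + 3 + 1 + 1 + 1) 48 :=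
    band_mod64 _ _ _ (by omega) (by omega) (by norm_num) (by norm_num) (by omega)
  rw [h6, h12, h24, h48]
  split_ifs <;> ring

lemma g_nonneg (t : Int) (ht : 0 ≤ t) : 0 ≤ sblStep t := by
  simp only [sblStep]
  split_ifs <;> omega

lemma iter_shift (m : Nat) (t k : Int) (ht : 0 ≤ t) (hk : 0 ≤ k) :
    sblStep^[m] (t + 64 * k) = sblStep^[m] t + 64 * k := by
  induction m generalizing t with
  | zero => simp
  | succ m ih =>
      rw [Function.iterate_succ_apply, Function.iterate_succ_apply,
        g_shift t k ht hk, ih (sblStep t) (g_nonneg t ht)]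

lemma warm_spec (fuel : Nat) : ∀ (n i t : Int), (min n 64 - i).toNat ≤ fuel →
    sblWarm n fuel t i = (sblStep^[(min n 64 - i).toNat] t, max i (min n 64)) := by
  induction fuel with
  | zero =>
      intro n i t h
      have h0 : (min n 64 - i).toNat = 0 := by omega
      have hle : min n 64 ≤ i := by omega
      simp [sblWarm, h0, max_eq_left hle]
  | succ fuel ih =>
      intro n i t h
      by_cases hc : i < n ∧ i < 64
      · have hlt : i < min n 64 := by omega
        have hrec := ih n (i + 1) (sblStep t) (by omega)
        show (if i < n ∧ i < 64 then sblWarm n fuel (sblStep t) (i+1) else (t, i)) = _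
        rw [if_pos hc, hrec]
        have hcount : (min n 64 - i).toNat = (min n 64 - (i + 1)).toNat + 1 := by omega
        rw [hcount, Function.iterate_succ_apply, max_eq_right (by omega : i + 1 ≤ min n 64),
          max_eq_right (by omega : i ≤ min n 64)]
      · have hle : min n 64 ≤ i := by omega
        have h0 : (min n 64 - i).toNat = 0 := by omega
        show (if i < n ∧ i < 64 then sblWarm n fuel (sblStep t) (i+1) else (t, i)) = _
        rw [if_neg hc, h0, max_eq_left hle]
        rfl

-- concrete facts about the trajectory, checked by the kernel
set_option maxRecDepth 20000 in
lemma t64_val : sblStep^[64] (0 : Int) = 346 := by decide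
set_option maxRecDepth 20000 in
lemma find_val : sblFind 346 64 (sblStep 346) 1 = (410, 12) := by decide
set_option maxRecDepth 20000 in
lemma g12_val : sblStep^[12] (346 : Int) = 410 := by decide

lemma cycle_pow (C : Nat) : sblStep^[C * 12] (346 : Int) = 346 + 64 * C := by
  induction C with
  | zero => simp
  | succ C ih =>
      have : (C + 1) * 12 = 12 + C * 12 := by ring
      rw [this, Function.iterate_add_apply, ih,
        iter_shift 12 346 C (by norm_num) (by positivity), g12_val]
      push_cast; ring

lemma alt_small (n : Int) (hn : n ≤ 64) : short_branchy_loop_alt n = sblStep^[n.toNat] 0 := by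
  unfold short_branchy_loop_alt
  rw [warm_spec 64 n 0 0 (by omega)]
  have h2 : ¬ (max 0 (min n 64) < n) := by omega
  simp only [if_neg h2]
  congr 1
  omega

lemma alt_big (n : Int) (hn : 64 < n) :
    short_branchy_loop_alt n =
      sblStep^[(PySem.Int.mod (n - 64) 12).toNat]
        (346 + PySem.Int.floordiv (n - 64) 12 * 64) := by
  unfold short_branchy_loop_alt
  rw [warm_spec 64 n 0 0 (by omega)]
  have hm : min n 64 = 64 := by omega
  have hmx : max (0:Int) 64 = 64 := by norm_num
  simp only [hm, hmx, show ((64:Int) - 0).toNat = 64 from by decide]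
  rw [t64_val, if_pos hn, find_val]
  simp only [foldl_const_iter, PySem.List.length_pyRange_one]
  congr 1
  omega

-- ===== VERDICT (by name: the statement is the Claim_ definition above) =====
theorem short_branchy_loop_spec : Claim_equal_short_branchy_loop := by
  intro n _
  show short_branchy_loop n = short_branchy_loop_alt n
  rw [A_iter]
  by_cases hn : n ≤ 64
  · rw [alt_small n hn]
  · rw [not_le] at hn
    rw [alt_big n hn]
    set cycles := PySem.Int.floordiv (n - 64) 12 with hcyc
    set rem := PySem.Int.mod (n - 64) 12 with hrem
    have hdm : cycles * 12 + rem = n - 64 := PySem.Int.floordiv_mul_add_mod _ _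
    have hr0 : 0 ≤ rem := PySem.Int.mod_nonneg _ (by norm_num)
    have hr12 : rem < 12 := PySem.Int.mod_lt _ (by norm_num)
    have hc0 : 0 ≤ cycles := by omega
    have hsplit : n.toNat = rem.toNat + (cycles.toNat * 12 + 64) := by omega
    rw [hsplit, Function.iterate_add_apply, Function.iterate_add_apply, t64_val,
      cycle_pow cycles.toNat]
    have : 346 + 64 * (cycles.toNat : Int) = 346 + cycles * 64 := by omega
    rw [this]
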